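-- pv_equiv track=rewrite | github.com/1000scores/CourseWork | Код серверной части и модуля обучения/SpamClassifier.py | list_to_tokens
-- ===== SOURCE A (Python) =====
-- def list_to_tokens(lst):
--     answer = []
--     for line in lst:
--         cur_line = line.lower()
--
--         for elem in cur_line.split(' '):
--             if elem == 'subject:' or elem == '':
--                 continue
--             is_okey = True
--             for ind, symbol in enumerate(elem):
--                 if symbol < 'a' or symbol > 'z':
--                     if ind == len(elem)-1:
--                         continue
--                     is_okey = False
--                     break
--             if is_okey:
--                 answer.append(elem)
--
--     return answer
-- ===== SOURCE B (Python) =====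
-- def list_to_tokens(lst):
--     # Single streaming pass per line: no split(), no per-word rescans.
--     # State machine over characters; validity of the word accumulated on the fly.
--     answer = []
--     for line in lst:
--         cur = []          # characters of the word being built
--         ok = True         # all chars of cur except the most recent are in a-z
--         last_alpha = True # most recent char of cur is in a-z (True when cur empty)
--         for ch in line.lower() + ' ':   # trailing sentinel space flushes the last word
--             if ch == ' ':
--                 if ok and cur and cur != list('subject:'):
--                     answer.append(''.join(cur))
--                 cur = []
--                 ok = True
--                 last_alpha = True
--             else:
--                 if cur:
--                     ok = ok and last_alpha
--                 cur.append(ch)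
--                 last_alpha = 'a' <= ch <= 'z'
--     return answer
-- ===== Notes on version B (the rewrite author's own statement) =====
-- stated objective: alternative
-- what changed: Replaced A's split-into-words-then-rescan-each-word-with-an-indexed-flag-loop structure by a single streaming state machine that scans each line's characters once, building the current word and carrying its validity (ok/last_alpha flags) incrementally, flushing on spaces (with a sentinel trailing space).
import Mathlib
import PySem

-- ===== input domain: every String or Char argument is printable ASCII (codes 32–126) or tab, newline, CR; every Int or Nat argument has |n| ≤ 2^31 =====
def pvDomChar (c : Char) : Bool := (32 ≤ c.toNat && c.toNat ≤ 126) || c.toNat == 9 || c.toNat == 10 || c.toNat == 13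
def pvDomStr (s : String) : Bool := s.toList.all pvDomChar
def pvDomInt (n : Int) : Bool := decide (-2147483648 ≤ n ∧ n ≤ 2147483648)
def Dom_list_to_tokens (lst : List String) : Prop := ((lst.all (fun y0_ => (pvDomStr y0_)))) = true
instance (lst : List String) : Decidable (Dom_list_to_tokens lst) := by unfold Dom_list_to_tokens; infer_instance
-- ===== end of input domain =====

-- B replaces A's split-into-words-then-rescan-each-word structure by a single streaming
-- state machine over the characters of each line, carrying word validity incrementally
-- (objective: alternative; same asymptotic cost).

-- ===== PORT A =====
-- the inner 'for ind, symbol in enumerate(elem)' loop of A, with its flag/break behaviour;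
-- n = len(elem), ind the running index
def aCheck (n : Nat) : Nat → List Char → Bool
  | _, [] => true
  | ind, symbol :: rest =>
      if decide (symbol < 'a') || decide (symbol > 'z') then
        if ind == n - 1 then aCheck n (ind + 1) rest
        else false
      else aCheck n (ind + 1) rest

def list_to_tokens (lst : List String) : List String :=
  lst.foldl (fun answer line =>
    let cur_line := PySem.Str.lower line
    ((PySem.Str.split? cur_line " ").getD []).foldl (fun answer elem =>
      if elem == "subject:" || elem == "" then answer
      else if aCheck elem.toList.length 0 elem.toList then answer ++ [elem]
      else answer) answer) []

-- ===== PORT B =====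
-- 'a' <= ch <= 'z'
def bAlpha (ch : Char) : Bool := decide ('a' ≤ ch) && decide (ch ≤ 'z')

-- B's inner character loop: state = (answer, cur, ok, last_alpha)
def bScan : List Char → List String → List Char → Bool → Bool → List String
  | [], answer, _, _, _ => answer
  | ch :: rest, answer, cur, ok, la =>
      if ch = ' ' then
        bScan rest
          (if ok && !cur.isEmpty && !(cur == "subject:".toList) then answer ++ [String.ofList cur]
           else answer)
          [] true true
      else
        bScan rest answer (cur ++ [ch]) (if cur.isEmpty then ok else ok && la) (bAlpha ch)

def list_to_tokens_alt (lst : List String) : List String :=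
  lst.foldl (fun answer line =>
    bScan ((PySem.Str.lower line).toList ++ [' ']) answer [] true true) []

-- ===== PRECONDITION & SPEC =====
def Spec_list_to_tokens (lst : List String) (out : List String) : Prop := out = list_to_tokens_alt lst
instance (lst : List String) (out : List String) : Decidable (Spec_list_to_tokens lst out) := by unfold Spec_list_to_tokens; infer_instance

-- ===== CLAIM (what is proved, stated in full; the proofs are below) =====
def Claim_equal_list_to_tokens : Prop := ∀ (lst : List String), Dom_list_to_tokens lst → Spec_list_to_tokens lst (list_to_tokens lst)

-- ===== LEMMAS AND PROOFS =====

-- the common word predicate both programs implement (proof-side only)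
def pL (w : List Char) : Bool :=
  !(w == []) && !(w == "subject:".toList) && w.dropLast.all bAlpha

-- the common splitting-on-' ' function both sides are reduced to (proof-side only)
def wordsC : List Char → List Char → List (List Char)
  | cur, [] => [cur]
  | cur, c :: cs => if c = ' ' then cur :: wordsC [] cs else wordsC (cur ++ [c]) cs

-- A's char test equals B's per-char range test
lemma charTest_eq (c : Char) :
    (!(decide (c < 'a') || decide (c > 'z'))) = bAlpha c := by
  simp [bAlpha, Bool.not_or, ← decide_not, not_lt]

-- A's inner loop over a word equals the all-on-dropLast check
lemma aCheck_eq : ∀ (cs : List Char) (ind : Nat),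
    aCheck (ind + cs.length) ind cs = cs.dropLast.all bAlpha := by
  intro cs
  induction cs with
  | nil => intro ind; simp [aCheck]
  | cons c rest ih =>
      intro ind
      have hgood : bAlpha c = !(decide (c < 'a') || decide (c > 'z')) := (charTest_eq c).symm
      cases rest with
      | nil => simp [aCheck]
      | cons d rest' =>
          have harr : ind + (c :: d :: rest').length = (ind + 1) + (d :: rest').length := by
            simp; omega
          rw [harr]
          rw [show aCheck ((ind + 1) + (d :: rest').length) ind (c :: d :: rest')
              = (if decide (c < 'a') || decide (c > 'z') then
                   (if ind == (ind + 1) + (d :: rest').length - 1 then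
                      aCheck ((ind + 1) + (d :: rest').length) (ind + 1) (d :: rest')
                    else false)
                 else aCheck ((ind + 1) + (d :: rest').length) (ind + 1) (d :: rest')) from rfl]
          rw [ih (ind + 1)]
          cases hb : (decide (c < 'a') || decide (c > 'z')) with
          | false => simp [hb, hgood, List.dropLast]
          | true =>
              simp [hb, hgood, List.dropLast]
              exact fun hx => absurd hx (by omega)

-- string comparison moved to the toList side
lemma beq_toList (w t : String) : (w == t) = (w.toList == t.toList) := by
  by_cases h : w = t
  · simp [h]
  · have h2 : w.toList ≠ t.toList := fun hc =>
      h (by have h3 := congrArg String.ofList hc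
            rwa [String.ofList_toList, String.ofList_toList] at h3)
    simp [h, h2]

-- A's per-word test equals pL on the word's characters
lemma word_test_eq (w : String) :
    (if w == "subject:" || w == "" then false
     else aCheck w.toList.length 0 w.toList) = pL w.toList := by
  have h := aCheck_eq w.toList 0
  simp only [Nat.zero_add] at h
  have hs : (w == "subject:") = (w.toList == "subject:".toList) := beq_toList w "subject:"
  have he : (w == "") = (w.toList == []) := by
    rw [beq_toList w "", show ("" : String).toList = [] from by decide]
  rw [pL, ← h, he, hs]
  cases h1 : (w.toList == "subject:".toList) <;> cases h2 : (w.toList == []) <;> simp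

-- A's inner fold appends exactly the pL-filtered words
lemma inner_fold_eq (ws : List String) (acc : List String) :
    ws.foldl (fun answer elem =>
      if elem == "subject:" || elem == "" then answer
      else if aCheck elem.toList.length 0 elem.toList then answer ++ [elem]
      else answer) acc
      = acc ++ ws.filter (fun w => pL w.toList) := by
  have hfun : (fun (answer : List String) (elem : String) =>
      if elem == "subject:" || elem == "" then answer
      else if aCheck elem.toList.length 0 elem.toList then answer ++ [elem]
      else answer)
      = (fun answer elem => if pL elem.toList then answer ++ [elem] else answer) := by
    funext answer elem
    have hw := word_test_eq elem
    by_cases hc : (elem == "subject:" || elem == "") = true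
    · rw [if_pos hc] at hw ⊢
      rw [← hw]; simp
    · rw [if_neg hc] at hw ⊢
      rw [← hw]
  rw [hfun, PySem.List.foldl_append_if_eq_filter]

-- PySem's fuel-based splitOn.go on the single-char separator ' ' computes wordsC
lemma go_eq_wordsC : ∀ (fuel : Nat) (l cur : List Char) (acc : List (List Char)),
    l.length < fuel →
    PySem.Chars.splitOn.go [' '] fuel l cur acc = acc.reverse ++ wordsC cur.reverse l := by
  intro fuel
  induction fuel with
  | zero => intro l cur acc h; omega
  | succ f ih =>
      intro l cur acc h
      cases l with
      | nil => simp [PySem.Chars.splitOn.go, wordsC]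
      | cons c rest =>
          by_cases hc : c = ' '
          · subst hc
            have hstep : PySem.Chars.splitOn.go [' '] (f + 1) (' ' :: rest) cur acc
                = PySem.Chars.splitOn.go [' '] f rest [] (cur.reverse :: acc) := by
              simp [PySem.Chars.splitOn.go, List.isPrefixOf]
            rw [hstep, ih rest [] (cur.reverse :: acc) (by simp at h ⊢; omega)]
            simp [wordsC]
          · have hstep : PySem.Chars.splitOn.go [' '] (f + 1) (c :: rest) cur acc
                = PySem.Chars.splitOn.go [' '] f rest (c :: cur) acc := by
              simp [PySem.Chars.splitOn.go, List.isPrefixOf, Ne.symm hc]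
            rw [hstep, ih rest (c :: cur) acc (by simp at h ⊢; omega)]
            simp [wordsC, hc]

lemma splitOn_eq_wordsC (cs : List Char) :
    PySem.Chars.splitOn cs [' '] = wordsC [] cs := by
  have := go_eq_wordsC (cs.length + 1) cs [] [] (by omega)
  simpa [PySem.Chars.splitOn] using this

-- what each program appends per line (proof-side only)
def lineTokens (line : String) : List String :=
  ((wordsC [] (PySem.Chars.lower line.toList)).filter pL).map (fun w => String.ofList w)

-- A's per-line step produces lineTokens
lemma stepA_eq (acc : List String) (line : String) :
    (let cur_line := PySem.Str.lower line
     ((PySem.Str.split? cur_line " ").getD []).foldl (fun answer elem =>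
        if elem == "subject:" || elem == "" then answer
        else if aCheck elem.toList.length 0 elem.toList then answer ++ [elem]
        else answer) acc)
      = acc ++ lineTokens line := by
  show ((PySem.Str.split? (PySem.Str.lower line) " ").getD []).foldl _ acc = _
  have hsplit : (PySem.Str.split? (PySem.Str.lower line) " ").getD []
      = (PySem.Chars.splitOn (PySem.Chars.lower line.toList) [' ']).map (fun w => String.ofList w) := by
    simp [PySem.Str.split?, PySem.Chars.split?, PySem.Str.lower]
  rw [hsplit, inner_fold_eq, splitOn_eq_wordsC, List.filter_map]
  have hcomp : ((fun w : String => pL w.toList) ∘ fun w : List Char => String.ofList w) = pL := by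
    funext w; simp [Function.comp, String.toList_ofList]
  rw [hcomp]
  unfold lineTokens
  rfl

-- last-char-alpha (default true) of the accumulated word
def laOf (cur : List Char) : Bool := (cur.getLast?.map bAlpha).getD true

lemma all_eq_dropLast_and_last (cur : List Char) :
    cur.all bAlpha = (cur.dropLast.all bAlpha && laOf cur) := by
  rcases List.eq_nil_or_concat cur with h | ⟨l, a, h⟩ <;> subst h <;>
    simp [laOf, List.all_append]

-- B's flush condition is pL
lemma flush_eq (cur : List Char) :
    (cur.dropLast.all bAlpha && !cur.isEmpty && !(cur == "subject:".toList)) = pL cur := by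
  have he : cur.isEmpty = (cur == []) := by cases cur <;> rfl
  rw [pL, he]
  cases h1 : (cur == []) <;> cases h2 : (cur == "subject:".toList) <;>
    cases h3 : cur.dropLast.all bAlpha <;> rfl

-- B's streaming scan over cs ++ [' '] appends exactly the pL-filtered words of cs
lemma bScan_eq : ∀ (cs : List Char) (answer : List String) (cur : List Char),
    bScan (cs ++ [' ']) answer cur (cur.dropLast.all bAlpha) (laOf cur)
      = answer ++ ((wordsC cur cs).filter pL).map (fun w => String.ofList w) := by
  intro cs
  induction cs with
  | nil =>
      intro answer cur
      have hunf : bScan ([] ++ [' ']) answer cur (cur.dropLast.all bAlpha) (laOf cur)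
          = (if cur.dropLast.all bAlpha && !cur.isEmpty && !(cur == "subject:".toList)
             then answer ++ [String.ofList cur] else answer) := rfl
      rw [hunf, flush_eq]
      cases h : pL cur <;> simp [wordsC, h]
  | cons c cs ih =>
      intro answer cur
      by_cases hc : c = ' '
      · subst hc
        have hunf : bScan ((' ' :: cs) ++ [' ']) answer cur (cur.dropLast.all bAlpha) (laOf cur)
            = bScan (cs ++ [' '])
                (if cur.dropLast.all bAlpha && !cur.isEmpty && !(cur == "subject:".toList)
                 then answer ++ [String.ofList cur] else answer) [] true true := rfl
        rw [hunf, flush_eq]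
        have ihh : bScan (cs ++ [' '])
            (if pL cur then answer ++ [String.ofList cur] else answer) [] true true
            = (if pL cur then answer ++ [String.ofList cur] else answer)
              ++ ((wordsC [] cs).filter pL).map (fun w => String.ofList w) :=
          ih (if pL cur then answer ++ [String.ofList cur] else answer) []
        rw [ihh]
        cases h : pL cur <;> simp [wordsC, h]
      · have hunf : bScan ((c :: cs) ++ [' ']) answer cur (cur.dropLast.all bAlpha) (laOf cur)
            = if c = ' ' then
                bScan (cs ++ [' '])
                  (if cur.dropLast.all bAlpha && !cur.isEmpty && !(cur == "subject:".toList)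
                   then answer ++ [String.ofList cur] else answer) [] true true
              else bScan (cs ++ [' ']) answer (cur ++ [c])
                (if cur.isEmpty then cur.dropLast.all bAlpha
                 else cur.dropLast.all bAlpha && laOf cur) (bAlpha c) := rfl
        rw [hunf, if_neg hc]
        have hok : (if cur.isEmpty then cur.dropLast.all bAlpha
            else cur.dropLast.all bAlpha && laOf cur) = (cur ++ [c]).dropLast.all bAlpha := by
          cases cur with
          | nil => simp
          | cons d ds =>
              rw [List.dropLast_concat, ← all_eq_dropLast_and_last]
              simp
        have hla : bAlpha c = laOf (cur ++ [c]) := by simp [laOf]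
        rw [hok, hla, ih answer (cur ++ [c])]
        simp [wordsC, hc]

-- B's per-line step produces lineTokens
lemma stepB_eq (acc : List String) (line : String) :
    bScan ((PySem.Str.lower line).toList ++ [' ']) acc [] true true = acc ++ lineTokens line := by
  have hl : (PySem.Str.lower line).toList = PySem.Chars.lower line.toList := by
    simp [PySem.Str.lower]
  rw [hl]
  have ihh : bScan (PySem.Chars.lower line.toList ++ [' ']) acc [] true true
      = acc ++ ((wordsC [] (PySem.Chars.lower line.toList)).filter pL).map
          (fun w => String.ofList w) :=
    bScan_eq (PySem.Chars.lower line.toList) acc []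
  rw [ihh]
  unfold lineTokens
  rfl

-- ===== VERDICT (by name: the statement is the Claim_ definition above) =====
theorem list_to_tokens_spec : Claim_equal_list_to_tokens := by
  intro lst _
  unfold Spec_list_to_tokens list_to_tokens list_to_tokens_alt
  have hA : (fun (answer : List String) (line : String) =>
      let cur_line := PySem.Str.lower line
      ((PySem.Str.split? cur_line " ").getD []).foldl (fun answer elem =>
        if elem == "subject:" || elem == "" then answer
        else if aCheck elem.toList.length 0 elem.toList then answer ++ [elem]
        else answer) answer)
      = (fun acc line => acc ++ lineTokens line) := by
    funext acc line; exact stepA_eq acc line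
  have hB : (fun (answer : List String) (line : String) =>
      bScan ((PySem.Str.lower line).toList ++ [' ']) answer [] true true)
      = (fun acc line => acc ++ lineTokens line) := by
    funext acc line; exact stepB_eq acc line
  rw [hA, hB]
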